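-- pv_equiv track=rewrite | github.com/ThabangLenonyana/CV-Analyzer | app/services/analyzer.py | _certification_matches
-- ===== SOURCE A (Python) =====
-- def _certification_matches(cert_name: str, requirement: str) -> bool:
--     """Check if certification matches requirement"""
--     cert_lower = cert_name.lower()
--     req_lower = requirement.lower()
--
--     # Direct match
--     if req_lower in cert_lower or cert_lower in req_lower:
--         return True
--
--     # Common certification abbreviations
--     cert_map = {
--         'aws certified': ['aws', 'amazon web services'],
--         'azure': ['az-', 'microsoft azure'],
--         'google cloud': ['gcp', 'google certified'],
--         'cisco': ['ccna', 'ccnp', 'ccie'],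
--         'comptia': ['a+', 'network+', 'security+']
--     }
--
--     for key, values in cert_map.items():
--         if any(v in req_lower for v in [key] + values) and any(v in cert_lower for v in [key] + values):
--             return True
--
--     return False
-- ===== SOURCE B (Python) =====
-- def _certification_matches(cert_name: str, requirement: str) -> bool:
--     """Check if certification matches requirement"""
--     cert_lower = cert_name.lower()
--     req_lower = requirement.lower()
--
--     # Direct match
--     if req_lower in cert_lower or cert_lower in req_lower:
--         return True
--
--     # Flat term table: each known certification term tagged with its family's bit
--     terms = [
--         ('aws certified', 1), ('aws', 1), ('amazon web services', 1),
--         ('azure', 2), ('az-', 2), ('microsoft azure', 2),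
--         ('google cloud', 4), ('gcp', 4), ('google certified', 4),
--         ('cisco', 8), ('ccna', 8), ('ccnp', 8), ('ccie', 8),
--         ('comptia', 16), ('a+', 16), ('network+', 16), ('security+', 16),
--     ]
--
--     cert_mask = 0
--     req_mask = 0
--     for term, bit in terms:
--         if term in cert_lower:
--             cert_mask |= bit
--         if term in req_lower:
--             req_mask |= bit
--     return (cert_mask & req_mask) != 0
-- ===== Notes on version B (the rewrite author's own statement) =====
-- stated objective: alternative
-- what changed: Replaces A's loop over the abbreviation dict with a paired any/any test per group by a single pass over a flat term-to-bit table that accumulates one bitmask per input string, returning whether the two masks intersect.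
import Mathlib
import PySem

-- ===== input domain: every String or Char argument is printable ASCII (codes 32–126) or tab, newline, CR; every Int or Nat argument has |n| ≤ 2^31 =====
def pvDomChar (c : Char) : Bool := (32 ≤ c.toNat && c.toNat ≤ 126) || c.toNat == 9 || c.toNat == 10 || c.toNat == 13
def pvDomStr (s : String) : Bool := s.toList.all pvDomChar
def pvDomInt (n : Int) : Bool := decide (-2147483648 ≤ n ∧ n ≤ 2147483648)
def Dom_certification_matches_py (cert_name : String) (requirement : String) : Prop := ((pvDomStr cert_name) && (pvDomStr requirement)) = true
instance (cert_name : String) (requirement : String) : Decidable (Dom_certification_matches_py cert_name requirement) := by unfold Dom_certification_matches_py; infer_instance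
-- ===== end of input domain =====

-- B replaces A's loop of paired any/any group tests by one pass over a flat term→bit table
-- accumulating two bitmasks and testing their intersection (alternative decomposition, same cost).

-- ===== PORT A =====
-- the dict literal cert_map
def pvCertMap : PySem.Dict String (List String) :=
  PySem.Dict.ofList
    [("aws certified", ["aws", "amazon web services"]),
     ("azure", ["az-", "microsoft azure"]),
     ("google cloud", ["gcp", "google certified"]),
     ("cisco", ["ccna", "ccnp", "ccie"]),
     ("comptia", ["a+", "network+", "security+"])]

def certification_matches_py (cert_name : String) (requirement : String) : Bool :=
  let cert_lower := PySem.Str.lower cert_name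
  let req_lower := PySem.Str.lower requirement
  -- Direct match
  if PySem.Str.isIn req_lower cert_lower || PySem.Str.isIn cert_lower req_lower then true
  else
    -- for key, values in cert_map.items(): if any(...) and any(...): return True
    if pvCertMap.items.any (fun kv =>
        (([kv.1] ++ kv.2).any fun v => PySem.Str.isIn v req_lower) &&
        (([kv.1] ++ kv.2).any fun v => PySem.Str.isIn v cert_lower)) then true
    else false

-- ===== PORT B =====
-- terms = [('aws certified', 1), …]: each term tagged with its family's bit
def pvTerms : List (String × Int) :=
  [("aws certified", 1), ("aws", 1), ("amazon web services", 1),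
   ("azure", 2), ("az-", 2), ("microsoft azure", 2),
   ("google cloud", 4), ("gcp", 4), ("google certified", 4),
   ("cisco", 8), ("ccna", 8), ("ccnp", 8), ("ccie", 8),
   ("comptia", 16), ("a+", 16), ("network+", 16), ("security+", 16)]

def certification_matches_py_alt (cert_name : String) (requirement : String) : Bool :=
  let cert_lower := PySem.Str.lower cert_name
  let req_lower := PySem.Str.lower requirement
  if PySem.Str.isIn req_lower cert_lower || PySem.Str.isIn cert_lower req_lower then true
  else
    -- for term, bit in terms: if term in cert_lower: cert_mask |= bit; if term in req_lower: req_mask |= bit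
    let masks := pvTerms.foldl
      (fun (ms : Int × Int) tb =>
        ((if PySem.Str.isIn tb.1 cert_lower then Int.lor ms.1 tb.2 else ms.1),
         (if PySem.Str.isIn tb.1 req_lower then Int.lor ms.2 tb.2 else ms.2)))
      (0, 0)
    decide (Int.land masks.1 masks.2 ≠ 0)

-- ===== PRECONDITION & SPEC =====
def Spec_certification_matches_py (cert_name : String) (requirement : String) (out : Bool) : Prop := out = certification_matches_py_alt cert_name requirement
instance (cert_name : String) (requirement : String) (out : Bool) : Decidable (Spec_certification_matches_py cert_name requirement out) := by unfold Spec_certification_matches_py; infer_instance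

-- ===== CLAIM (what is proved, stated in full; the proofs are below) =====
def Claim_equal_certification_matches_py : Prop := ∀ (cert_name : String) (requirement : String), Dom_certification_matches_py cert_name requirement → Spec_certification_matches_py cert_name requirement (certification_matches_py cert_name requirement)

-- ===== LEMMAS AND PROOFS =====

theorem pv_or_or_self (m b : ℕ) : (m ||| b) ||| b = m ||| b := by
  rw [Nat.or_assoc, Nat.or_self]

-- the paired fold computes the two masks independently
theorem pv_pair_split (c r : String) (L : List (String × Int)) (mc mr : Int) :
    L.foldl
      (fun (ms : Int × Int) tb =>
        ((if PySem.Str.isIn tb.1 c then Int.lor ms.1 tb.2 else ms.1),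
         (if PySem.Str.isIn tb.1 r then Int.lor ms.2 tb.2 else ms.2))) (mc, mr)
      = (L.foldl (fun m tb => if PySem.Str.isIn tb.1 c then Int.lor m tb.2 else m) mc,
         L.foldl (fun m tb => if PySem.Str.isIn tb.1 r then Int.lor m tb.2 else m) mr) := by
  induction L generalizing mc mr with
  | nil => rfl
  | cons h t ih => simp only [List.foldl_cons, ih]

-- folding one family's chunk (all terms share bit b) sets bit b iff some term occurs in s
theorem pv_fold_chunk (s : String) (b : ℕ) (ts : List String) (m : ℕ) :
    (ts.map (fun t => (t, Int.ofNat b))).foldl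
        (fun m tb => if PySem.Str.isIn tb.1 s then Int.lor m tb.2 else m) (Int.ofNat m)
      = Int.ofNat (if ts.any (fun t => PySem.Str.isIn t s) then m ||| b else m) := by
  induction ts generalizing m with
  | nil => simp
  | cons t rest ih =>
    simp only [List.map_cons, List.foldl_cons, List.any_cons]
    have hlor : Int.lor (Int.ofNat m) (Int.ofNat b) = Int.ofNat (m ||| b) := rfl
    by_cases h : PySem.Str.isIn t s = true
    · rw [if_pos h, hlor, ih]
      simp only [h, Bool.true_or, reduceIte]
      by_cases h2 : (rest.any fun t => PySem.Str.isIn t s) = true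
      · simp only [h2, reduceIte, pv_or_or_self]
      · rw [Bool.not_eq_true] at h2
        simp only [h2, Bool.false_eq_true, reduceIte]
    · rw [if_neg h, ih]
      rw [Bool.not_eq_true] at h
      simp only [h, Bool.false_or]


-- proof helper: the mask value as a function of the five family-hit booleans
def pvMask (a1 a2 a3 a4 a5 : Bool) : ℕ :=
  let m1 := if a1 = true then 0 ||| 1 else 0
  let m2 := if a2 = true then m1 ||| 2 else m1
  let m3 := if a3 = true then m2 ||| 4 else m2
  let m4 := if a4 = true then m3 ||| 8 else m3
  if a5 = true then m4 ||| 16 else m4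

-- the group-level identity: A's any-of-conjunctions equals B's mask-intersection test
set_option maxHeartbeats 1000000 in
theorem pv_final (a1 a2 a3 a4 a5 b1 b2 b3 b4 b5 : Bool) :
    (if (b1 && a1 || (b2 && a2 || (b3 && a3 || (b4 && a4 || (b5 && a5 || false))))) = true
        then true else false)
      = decide (Int.land (Int.ofNat (pvMask a1 a2 a3 a4 a5)) (Int.ofNat (pvMask b1 b2 b3 b4 b5)) ≠ 0) := by
  revert a1 a2 a3 a4 a5 b1 b2 b3 b4 b5
  decide

-- ===== VERDICT (by name: the statement is the Claim_ definition above) =====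
set_option maxHeartbeats 2000000 in
theorem certification_matches_py_spec : Claim_equal_certification_matches_py := by
  intro cert_name requirement _
  unfold Spec_certification_matches_py certification_matches_py certification_matches_py_alt
  set c := PySem.Str.lower cert_name with hc
  set r := PySem.Str.lower requirement with hr
  by_cases hd : (PySem.Str.isIn r c || PySem.Str.isIn c r) = true
  · simp only [hd, if_pos]
  · rw [if_neg hd, if_neg hd]
    have hterms : pvTerms
        = (["aws certified", "aws", "amazon web services"].map (fun t => (t, Int.ofNat 1)))
          ++ (["azure", "az-", "microsoft azure"].map (fun t => (t, Int.ofNat 2)))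
          ++ (["google cloud", "gcp", "google certified"].map (fun t => (t, Int.ofNat 4)))
          ++ (["cisco", "ccna", "ccnp", "ccie"].map (fun t => (t, Int.ofNat 8)))
          ++ (["comptia", "a+", "network+", "security+"].map (fun t => (t, Int.ofNat 16))) := rfl
    have hitems : pvCertMap.items =
        [("aws certified", ["aws", "amazon web services"]),
         ("azure", ["az-", "microsoft azure"]),
         ("google cloud", ["gcp", "google certified"]),
         ("cisco", ["ccna", "ccnp", "ccie"]),
         ("comptia", ["a+", "network+", "security+"])] := rfl
    have h0 : ((0 : Int), (0 : Int)) = (Int.ofNat 0, Int.ofNat 0) := rfl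
    rw [h0, pv_pair_split, hterms]
    rw [List.foldl_append, List.foldl_append, List.foldl_append, List.foldl_append,
        List.foldl_append, List.foldl_append, List.foldl_append, List.foldl_append]
    rw [pv_fold_chunk c 1, pv_fold_chunk c 2, pv_fold_chunk c 4, pv_fold_chunk c 8,
        pv_fold_chunk c 16, pv_fold_chunk r 1, pv_fold_chunk r 2, pv_fold_chunk r 4,
        pv_fold_chunk r 8, pv_fold_chunk r 16]
    rw [hitems]
    simp only [List.any_cons, List.any_nil, List.cons_append, List.nil_append]
    exact pv_final _ _ _ _ _ _ _ _ _ _
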